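-- pv_equiv track=rewrite | github.com/KubiakJakub01/NLP-Research | nlp_research/deep_ml/nlp.py | osa
-- ===== SOURCE A (Python) =====
-- def osa(source: str, target: str) -> int:
--     """
--     Compute the Optimal String Alignment (OSA) distance between two strings.
--
--     :param source: The source string
--     :param target: The target string
--     :return: The OSA distance between the two strings
--     """
--     len_s = len(source)
--     len_t = len(target)
--
--     d = [[0] * (len_t + 1) for _ in range(len_s + 1)]
--
--     for i in range(len_s + 1):
--         d[i][0] = i
--
--     for j in range(len_t + 1):
--         d[0][j] = j
--
--     for i in range(1, len_s + 1):
--         for j in range(1, len_t + 1):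
--             cost = 0 if source[i - 1] == target[j - 1] else 1
--
--             d[i][j] = min(d[i - 1][j] + 1, d[i][j - 1] + 1, d[i - 1][j - 1] + cost)
--             if (
--                 i > 1
--                 and j > 1
--                 and source[i - 1] == target[j - 2]
--                 and source[i - 2] == target[j - 1]
--             ):
--                 d[i][j] = min(d[i][j], d[i - 2][j - 2] + cost)
--
--     for i in range(1, len_s + 1):
--         for j in range(1, len_t + 1):
--             cost = 0 if source[i - 1] == target[j - 1] else 1
--             d[i][j] = min(d[i - 1][j] + 1, d[i][j - 1] + 1, d[i - 1][j - 1] + cost)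
--             if (
--                 i > 1
--                 and j > 1
--                 and source[i - 1] == target[j - 2]
--                 and source[i - 2] == target[j - 1]
--             ):
--                 d[i][j] = min(d[i][j], d[i - 2][j - 2] + 1)
--
--     return d[len_s][len_t]
-- ===== SOURCE B (Python) =====
-- def osa(source: str, target: str) -> int:
--     """Top-down memoized recursion: computes f(i, j) = OSA distance between
--     source[:i] and target[:j] on demand with an explicit memo dict."""
--     memo: dict[tuple[int, int], int] = {}
--     memo_get = memo.get
--
--     def f(i: int, j: int) -> int:
--         if j == 0:
--             return i
--         if i == 0:
--             return j
--         key = (i, j)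
--         cached = memo_get(key)
--         if cached is not None:
--             return cached
--         cost = 0 if source[i - 1] == target[j - 1] else 1
--         best = min(f(i - 1, j) + 1, f(i, j - 1) + 1, f(i - 1, j - 1) + cost)
--         if i > 1 and j > 1 and source[i - 1] == target[j - 2] and source[i - 2] == target[j - 1]:
--             best = min(best, f(i - 2, j - 2) + 1)
--         memo[key] = best
--         return best
--
--     return f(len(source), len(target))
-- ===== Notes on version B (the rewrite author's own statement) =====
-- stated objective: alternative
-- what changed: Replaced A's staged bottom-up table fill (a full (m+1)x(n+1) matrix initialised then rewritten in two complete double-loop passes) by a top-down demand-driven recursion f(i,j) on string prefixes with an explicit memo dict: cells are computed on demand by recursive calls, no matrix and no fixed fill order exist.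
import Mathlib
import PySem

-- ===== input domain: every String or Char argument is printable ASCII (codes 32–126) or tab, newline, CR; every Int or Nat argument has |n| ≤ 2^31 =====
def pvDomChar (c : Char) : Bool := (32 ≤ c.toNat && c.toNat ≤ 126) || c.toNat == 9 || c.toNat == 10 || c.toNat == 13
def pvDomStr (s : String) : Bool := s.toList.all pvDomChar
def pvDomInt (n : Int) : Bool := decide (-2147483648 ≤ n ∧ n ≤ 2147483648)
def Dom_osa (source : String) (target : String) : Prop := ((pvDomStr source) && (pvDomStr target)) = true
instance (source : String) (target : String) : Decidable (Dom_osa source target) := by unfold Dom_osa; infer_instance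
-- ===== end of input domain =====

-- B replaces A's staged bottom-up table fill by a top-down memoized recursion on prefixes (explicit memo dict, cells computed on demand).


-- ===== PORT A =====
-- The Python 2-D list d is a List (List Int); d[i][j] reads and d[i][j] = v assignments are
-- pvGet / pvSet. All indices A ever reads or writes are in range, so List.getD/List.set are exact.
def pvGet (d : List (List Int)) (i j : Nat) : Int := (d.getD i []).getD j 0

def pvSet (d : List (List Int)) (i j : Nat) (v : Int) : List (List Int) :=
  d.set i ((d.getD i []).set j v)

-- body of A's FIRST pass (transposition branch adds `cost`); indices in A are always in
-- range, so `List.getD` is an exact port of source[i-1] / target[j-1].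
def osaCell1 (s t : List Char) (d : Nat → Nat → Int) (i j : Nat) : Int :=
  let cost : Int := if s.getD (i-1) ' ' = t.getD (j-1) ' ' then 0 else 1
  let v := min (min (d (i-1) j + 1) (d i (j-1) + 1)) (d (i-1) (j-1) + cost)
  if 1 < i ∧ 1 < j ∧ s.getD (i-1) ' ' = t.getD (j-2) ' ' ∧ s.getD (i-2) ' ' = t.getD (j-1) ' '
  then min v (d (i-2) (j-2) + cost) else v

-- body of A's SECOND pass (transposition branch adds 1)
def osaCell2 (s t : List Char) (d : Nat → Nat → Int) (i j : Nat) : Int :=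
  let cost : Int := if s.getD (i-1) ' ' = t.getD (j-1) ' ' then 0 else 1
  let v := min (min (d (i-1) j + 1) (d i (j-1) + 1)) (d (i-1) (j-1) + cost)
  if 1 < i ∧ 1 < j ∧ s.getD (i-1) ' ' = t.getD (j-2) ' ' ∧ s.getD (i-2) ' ' = t.getD (j-1) ' '
  then min v (d (i-2) (j-2) + 1) else v

def osa (source : String) (target : String) : Int :=
  let s := source.toList
  let t := target.toList
  let lenS := s.length
  let lenT := t.length
  -- d = [[0] * (len_t + 1) for _ in range(len_s + 1)]
  let d0 : List (List Int) := List.replicate (lenS + 1) (List.replicate (lenT + 1) 0)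
  -- for i in range(len_s+1): d[i][0] = i
  let d1 := (List.range (lenS + 1)).foldl (fun d i => pvSet d i 0 (i : Int)) d0
  -- for j in range(len_t+1): d[0][j] = j
  let d2 := (List.range (lenT + 1)).foldl (fun d j => pvSet d 0 j (j : Int)) d1
  -- first double loop (range(1, len+1) = List.range' 1 len)
  let d3 := (List.range' 1 lenS).foldl
      (fun d i => (List.range' 1 lenT).foldl (fun d j => pvSet d i j (osaCell1 s t (pvGet d) i j)) d) d2
  -- second double loop
  let d4 := (List.range' 1 lenS).foldl
      (fun d i => (List.range' 1 lenT).foldl (fun d j => pvSet d i j (osaCell2 s t (pvGet d) i j)) d) d3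
  pvGet d4 lenS lenT

-- ===== PORT B =====
-- Source B's inner `def f(i, j)` with the memo dict threaded through (the Python closes over
-- `memo` and mutates it; here the dict is passed in and the updated dict returned).
def osaAltF (s t : List Char) (i j : Nat) (memo : PySem.Dict (Nat × Nat) Int) :
    Int × PySem.Dict (Nat × Nat) Int :=
  if j = 0 then ((i : Int), memo)
  else if i = 0 then ((j : Int), memo)
  else
    match memo.get? (i, j) with
    | some v => (v, memo)                               -- cached hit
    | none =>
      let r1 := osaAltF s t (i-1) j memo
      let r2 := osaAltF s t i (j-1) r1.2
      let r3 := osaAltF s t (i-1) (j-1) r2.2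
      let cost : Int := if s.getD (i-1) ' ' = t.getD (j-1) ' ' then 0 else 1
      let best := min (min (r1.1 + 1) (r2.1 + 1)) (r3.1 + cost)
      if 1 < i ∧ 1 < j ∧ s.getD (i-1) ' ' = t.getD (j-2) ' ' ∧ s.getD (i-2) ' ' = t.getD (j-1) ' '
      then
        let r4 := osaAltF s t (i-2) (j-2) r3.2
        let best2 := min best (r4.1 + 1)
        (best2, r4.2.insert (i, j) best2)
      else (best, r3.2.insert (i, j) best)
termination_by i + j
decreasing_by all_goals omega

def osa_alt (source : String) (target : String) : Int :=
  (osaAltF source.toList target.toList source.toList.length target.toList.length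
    PySem.Dict.empty).1

-- ===== PRECONDITION & SPEC =====
def Spec_osa (source : String) (target : String) (out : Int) : Prop := out = osa_alt source target
instance (source : String) (target : String) (out : Int) : Decidable (Spec_osa source target out) := by unfold Spec_osa; infer_instance

-- ===== CLAIM (what is proved, stated in full; the proofs are below) =====
def Claim_equal_osa : Prop := ∀ (source : String) (target : String), Dom_osa source target → Spec_osa source target (osa source target)

-- ===== LEMMAS AND PROOFS =====

-- the OSA recurrence both programs compute (transposition branch +1, as in A's live second pass)
def refD (s t : List Char) : Nat → Nat → Int
  | 0, j => (j : Int)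
  | i+1, 0 => ((i+1 : Nat) : Int)
  | i+1, j+1 =>
    let cost : Int := if s.getD i ' ' = t.getD j ' ' then 0 else 1
    let m := min (min (refD s t i (j+1) + 1) (refD s t (i+1) j + 1)) (refD s t i j + cost)
    if 1 ≤ i ∧ 1 ≤ j ∧ s.getD i ' ' = t.getD (j-1) ' ' ∧ s.getD (i-1) ' ' = t.getD j ' '
    then min m (refD s t (i-1) (j-1) + 1) else m
termination_by i j => (i, j)
decreasing_by
  · exact Prod.Lex.left _ _ (by omega)
  · exact Prod.Lex.right _ (by omega)
  · exact Prod.Lex.left _ _ (by omega)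
  · exact Prod.Lex.left _ _ (by omega)

-- proof-side abstraction: the matrix as a total function, with pointwise update
def pvUpd (d : Nat → Nat → Int) (i j : Nat) (v : Int) : Nat → Nat → Int :=
  fun i' j' => if i' = i ∧ j' = j then v else d i' j'

def ShapeM (d : List (List Int)) (m n : Nat) : Prop :=
  d.length = m ∧ ∀ k (h : k < d.length), d[k].length = n

theorem shape_pvSet (d : List (List Int)) (m n i j : Nat) (v : Int)
    (hd : ShapeM d m n) : ShapeM (pvSet d i j v) m n := by
  obtain ⟨h1, h2⟩ := hd
  unfold pvSet
  refine ⟨by simpa using h1, fun k hk => ?_⟩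
  rw [List.getElem_set]
  split
  · next he =>
    subst he
    rcases Nat.lt_or_ge i d.length with h | h
    · rw [List.getD_eq_getElem d [] h]
      simpa using h2 i h
    · simp at hk
      omega
  · exact h2 k (by simpa using hk)

theorem pvGet_pvSet (d : List (List Int)) (m n i j : Nat) (v : Int)
    (hd : ShapeM d m n) (hi : i < m) (hj : j < n) :
    pvGet (pvSet d i j v) = pvUpd (pvGet d) i j v := by
  obtain ⟨h1, h2⟩ := hd
  have hid : i < d.length := by omega
  have hrow : (d.getD i []).length = n := by
    rw [List.getD_eq_getElem d [] hid]; exact h2 i hid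
  funext i' j'
  unfold pvGet pvSet pvUpd
  by_cases hii : i' = i
  · subst hii
    have hrowset : (d.set i' ((d.getD i' []).set j v)).getD i' [] = (d.getD i' []).set j v := by
      rw [List.getD_eq_getElem?_getD, List.getElem?_set_self (by simpa using hid),
        Option.getD_some]
    rw [hrowset]
    by_cases hjj : j' = j
    · subst hjj
      rw [if_pos ⟨rfl, rfl⟩, List.getD_eq_getElem?_getD,
        List.getElem?_set_self (by omega), Option.getD_some]
    · rw [if_neg (by tauto), List.getD_eq_getElem?_getD,
        List.getElem?_set_ne (fun h => hjj h.symm), ← List.getD_eq_getElem?_getD]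
  · have hother : (d.set i ((d.getD i []).set j v)).getD i' [] = d.getD i' [] := by
      rw [List.getD_eq_getElem?_getD, List.getElem?_set_ne (fun h => hii h.symm),
        ← List.getD_eq_getElem?_getD]
    rw [if_neg (by tauto), hother]

theorem simRows (m n : Nat) (hn : 0 < n) :
    ∀ (L : List Nat) (d : List (List Int)), ShapeM d m n → (∀ x ∈ L, x < m) →
    ShapeM (L.foldl (fun d i => pvSet d i 0 (i : Int)) d) m n ∧
    pvGet (L.foldl (fun d i => pvSet d i 0 (i : Int)) d)
      = L.foldl (fun g i => pvUpd g i 0 (i : Int)) (pvGet d) := by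
  intro L
  induction L with
  | nil => exact fun d hd _ => ⟨hd, rfl⟩
  | cons x L ih =>
    intro d hd hL
    obtain ⟨s', e'⟩ := ih (pvSet d x 0 (x : Int)) (shape_pvSet d m n x 0 _ hd)
      (fun y hy => hL y (List.mem_cons_of_mem x hy))
    refine ⟨s', ?_⟩
    rw [List.foldl_cons, List.foldl_cons, e',
      pvGet_pvSet d m n x 0 _ hd (hL x List.mem_cons_self) hn]

theorem simCols (m n : Nat) (hm : 0 < m) :
    ∀ (L : List Nat) (d : List (List Int)), ShapeM d m n → (∀ x ∈ L, x < n) →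
    ShapeM (L.foldl (fun d j => pvSet d 0 j (j : Int)) d) m n ∧
    pvGet (L.foldl (fun d j => pvSet d 0 j (j : Int)) d)
      = L.foldl (fun g j => pvUpd g 0 j (j : Int)) (pvGet d) := by
  intro L
  induction L with
  | nil => exact fun d hd _ => ⟨hd, rfl⟩
  | cons x L ih =>
    intro d hd hL
    obtain ⟨s', e'⟩ := ih (pvSet d 0 x (x : Int)) (shape_pvSet d m n 0 x _ hd)
      (fun y hy => hL y (List.mem_cons_of_mem x hy))
    refine ⟨s', ?_⟩
    rw [List.foldl_cons, List.foldl_cons, e',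
      pvGet_pvSet d m n 0 x _ hd hm (hL x List.mem_cons_self)]

theorem simRow (m n i : Nat) (hi : i < m) (C : (Nat → Nat → Int) → Nat → Nat → Int) :
    ∀ (L : List Nat) (d : List (List Int)), ShapeM d m n → (∀ j ∈ L, j < n) →
    ShapeM (L.foldl (fun d j => pvSet d i j (C (pvGet d) i j)) d) m n ∧
    pvGet (L.foldl (fun d j => pvSet d i j (C (pvGet d) i j)) d)
      = L.foldl (fun g j => pvUpd g i j (C g i j)) (pvGet d) := by
  intro L
  induction L with
  | nil => exact fun d hd _ => ⟨hd, rfl⟩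
  | cons x L ih =>
    intro d hd hL
    have hg := pvGet_pvSet d m n i x (C (pvGet d) i x) hd hi (hL x List.mem_cons_self)
    obtain ⟨s', e'⟩ := ih (pvSet d i x (C (pvGet d) i x)) (shape_pvSet d m n i x _ hd)
      (fun y hy => hL y (List.mem_cons_of_mem x hy))
    refine ⟨s', ?_⟩
    rw [List.foldl_cons, List.foldl_cons, e', hg]

theorem simPass (m n lenT : Nat) (hn : lenT < n) (C : (Nat → Nat → Int) → Nat → Nat → Int) :
    ∀ (L : List Nat) (d : List (List Int)), ShapeM d m n → (∀ i ∈ L, i < m) →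
    ShapeM (L.foldl (fun d i =>
        (List.range' 1 lenT).foldl (fun d j => pvSet d i j (C (pvGet d) i j)) d) d) m n ∧
    pvGet (L.foldl (fun d i =>
        (List.range' 1 lenT).foldl (fun d j => pvSet d i j (C (pvGet d) i j)) d) d)
      = L.foldl (fun g i =>
          (List.range' 1 lenT).foldl (fun g j => pvUpd g i j (C g i j)) g) (pvGet d) := by
  intro L
  induction L with
  | nil => exact fun d hd _ => ⟨hd, rfl⟩
  | cons x L ih =>
    intro d hd hL
    have hrow := simRow m n x (hL x List.mem_cons_self) C (List.range' 1 lenT) d hd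
      (fun j hj => by have := List.mem_range'_1.mp hj; omega)
    obtain ⟨s', e'⟩ := ih _ hrow.1 (fun y hy => hL y (List.mem_cons_of_mem x hy))
    refine ⟨s', ?_⟩
    rw [List.foldl_cons, List.foldl_cons, e', hrow.2]

theorem shape_init (m n : Nat) :
    ShapeM (List.replicate m (List.replicate n (0 : Int))) m n := by
  refine ⟨by simp, fun k hk => ?_⟩
  simp at hk
  simp [List.getElem_replicate]

theorem pvGet_init (m n : Nat) :
    pvGet (List.replicate m (List.replicate n (0 : Int))) = fun _ _ => (0 : Int) := by
  funext i j
  simp [pvGet, List.getD_eq_getElem?_getD, List.getElem?_replicate]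
  split_ifs <;> simp

theorem pvUpd_self (d : Nat → Nat → Int) (i j : Nat) (v : Int) : pvUpd d i j v i j = v := by
  simp [pvUpd]

theorem pvUpd_other (d : Nat → Nat → Int) (i j : Nat) (v : Int) (i' j' : Nat)
    (h : ¬ (i' = i ∧ j' = j)) : pvUpd d i j v i' j' = d i' j' := by
  simp [pvUpd, h]

-- one recurrence step: any computation of the cell body from correct reads gives refD
theorem refD_step (s t : List Char) (i j : Nat) (hi : 1 ≤ i) (hj : 1 ≤ j)
    (v1 v2 v3 v4 : Int)
    (h1 : v1 = refD s t (i-1) j) (h2 : v2 = refD s t i (j-1))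
    (h3 : v3 = refD s t (i-1) (j-1))
    (h4 : 1 < i → 1 < j → v4 = refD s t (i-2) (j-2)) :
    (let cost : Int := if s.getD (i-1) ' ' = t.getD (j-1) ' ' then 0 else 1;
     let m := min (min (v1 + 1) (v2 + 1)) (v3 + cost);
     if 1 < i ∧ 1 < j ∧ s.getD (i-1) ' ' = t.getD (j-2) ' ' ∧ s.getD (i-2) ' ' = t.getD (j-1) ' '
     then min m (v4 + 1) else m) = refD s t i j := by
  obtain ⟨i0, rfl⟩ : ∃ i0, i = i0 + 1 := ⟨i - 1, by omega⟩
  obtain ⟨j0, rfl⟩ : ∃ j0, j = j0 + 1 := ⟨j - 1, by omega⟩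
  have e2 : ∀ n : Nat, n + 1 - 2 = n - 1 := fun n => by omega
  simp only [Nat.add_sub_cancel, e2] at h1 h2 h3 h4 ⊢
  subst h1 h2 h3
  conv_rhs => rw [refD]
  by_cases hc : 1 ≤ i0 ∧ 1 ≤ j0 ∧ s.getD i0 ' ' = t.getD (j0-1) ' ' ∧ s.getD (i0-1) ' ' = t.getD j0 ' '
  · have h4' := h4 (by omega) (by omega)
    subst h4'
    rw [if_pos (show (1:Nat) < i0+1 ∧ (1:Nat) < j0+1 ∧ s.getD i0 ' ' = t.getD (j0-1) ' ' ∧ s.getD (i0-1) ' ' = t.getD j0 ' ' from ⟨by omega, by omega, hc.2.2.1, hc.2.2.2⟩)]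
    rw [if_pos hc]
  · rw [if_neg (show ¬((1:Nat) < i0+1 ∧ (1:Nat) < j0+1 ∧ s.getD i0 ' ' = t.getD (j0-1) ' ' ∧ s.getD (i0-1) ' ' = t.getD j0 ' ') from fun ⟨x,y,z,w⟩ => hc ⟨by omega, by omega, z, w⟩)]
    rw [if_neg hc]

-- ===== A-side =====

-- a row-update fold leaves every cell outside the written range unchanged
theorem innerPres (F : (Nat → Nat → Int) → Nat → Nat → Int) (i : Nat) :
    ∀ (k a : Nat) (d : Nat → Nat → Int) (i' j' : Nat), (i' ≠ i ∨ j' < a) →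
    ((List.range' a k).foldl (fun d j => pvUpd d i j (F d i j)) d) i' j' = d i' j' := by
  intro k
  induction k with
  | zero => intro a d i' j' h; simp [List.range']
  | succ k ih =>
    intro a d i' j' h
    rw [List.range'_succ, List.foldl_cons]
    rw [ih (a+1) _ i' j' (by omega)]
    exact pvUpd_other _ _ _ _ _ _ (by omega)

-- both double loops leave the boundary row/column unchanged
theorem passPres (C : List Char → List Char → (Nat → Nat → Int) → Nat → Nat → Int)
    (s t : List Char) (lenT : Nat) :
    ∀ (k a : Nat) (d : Nat → Nat → Int) (i' j' : Nat), 1 ≤ a → (i' = 0 ∨ j' = 0) →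
    ((List.range' a k).foldl
      (fun d i => (List.range' 1 lenT).foldl (fun d j => pvUpd d i j (C s t d i j)) d) d) i' j'
      = d i' j' := by
  intro k
  induction k with
  | zero => intro a d i' j' _ h; simp [List.range']
  | succ k ih =>
    intro a d i' j' ha h
    rw [List.range'_succ, List.foldl_cons]
    rw [ih (a+1) _ i' j' (by omega) h]
    exact innerPres (fun d i j => C s t d i j) a lenT 1 d i' j' (by omega)
theorem initRows (v : Nat → Int) :
    ∀ (k a : Nat) (d : Nat → Nat → Int) (i' j' : Nat),
    ((List.range' a k).foldl (fun d i => pvUpd d i 0 (v i)) d) i' j'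
      = if j' = 0 ∧ a ≤ i' ∧ i' < a + k then v i' else d i' j' := by
  intro k
  induction k with
  | zero => intro a d i' j'; simp [List.range']
  | succ k ih =>
    intro a d i' j'
    rw [List.range'_succ, List.foldl_cons, ih]
    by_cases h : i' = a ∧ j' = 0
    · obtain ⟨rfl, rfl⟩ := h
      rw [if_neg (by omega), pvUpd_self, if_pos (by omega)]
    · rw [pvUpd_other _ _ _ _ _ _ (by tauto)]
      split_ifs with h1 h2 <;> first | rfl | omega

theorem initCols (v : Nat → Int) :
    ∀ (k a : Nat) (d : Nat → Nat → Int) (i' j' : Nat),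
    ((List.range' a k).foldl (fun d j => pvUpd d 0 j (v j)) d) i' j'
      = if i' = 0 ∧ a ≤ j' ∧ j' < a + k then v j' else d i' j' := by
  intro k
  induction k with
  | zero => intro a d i' j'; simp [List.range']
  | succ k ih =>
    intro a d i' j'
    rw [List.range'_succ, List.foldl_cons, ih]
    by_cases h : i' = 0 ∧ j' = a
    · obtain ⟨rfl, rfl⟩ := h
      rw [if_neg (by omega), pvUpd_self, if_pos (by omega)]
    · rw [pvUpd_other _ _ _ _ _ _ (by tauto)]
      split_ifs with h1 h2 <;> first | rfl | omega

-- invariant for one row of A's second pass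
theorem pass2Row (s t : List Char) (lenS lenT i : Nat) (hi : 1 ≤ i) (hiS : i ≤ lenS) :
    ∀ (k a : Nat) (d : Nat → Nat → Int), 1 ≤ a → a + k = lenT + 1 →
    (∀ i' j', i' ≤ lenS → j' ≤ lenT → (i' < i ∨ (i' = i ∧ j' < a) ∨ j' = 0) →
      d i' j' = refD s t i' j') →
    (∀ i' j', i' ≤ lenS → j' ≤ lenT → (i' < i ∨ (i' = i ∧ j' < a + k) ∨ j' = 0) →
      ((List.range' a k).foldl (fun d j => pvUpd d i j (osaCell2 s t d i j)) d) i' j'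
        = refD s t i' j') := by
  intro k
  induction k with
  | zero =>
    intro a d _ _ hd i' j' h1 h2 h3
    simpa [List.range'] using hd i' j' h1 h2 h3
  | succ k ih =>
    intro a d ha hak hd
    rw [List.range'_succ, List.foldl_cons]
    have hres := ih (a+1) (pvUpd d i a (osaCell2 s t d i a)) (by omega) (by omega) ?_
    · intro i' j' h1 h2 h3
      exact hres i' j' h1 h2 (by omega)
    · intro i' j' h1 h2 h3
      by_cases he : i' = i ∧ j' = a
      · obtain ⟨rfl, rfl⟩ := he
        rw [pvUpd_self]
        exact refD_step s t i' j' hi (by omega)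
          (d (i'-1) j') (d i' (j'-1)) (d (i'-1) (j'-1)) (d (i'-2) (j'-2))
          (hd _ _ (by omega) (by omega) (Or.inl (by omega)))
          (hd _ _ (by omega) (by omega) (Or.inr (Or.inl ⟨rfl, by omega⟩)))
          (hd _ _ (by omega) (by omega) (Or.inl (by omega)))
          (fun hx hy => (hd _ _ (by omega) (by omega) (Or.inl (by omega))))
      · rw [pvUpd_other _ _ _ _ _ _ he]
        exact hd i' j' h1 h2 (by omega)

-- A's second pass rewrites the whole interior with refD
theorem pass2All (s t : List Char) (lenS lenT : Nat) :
    ∀ (k a : Nat) (d : Nat → Nat → Int), 1 ≤ a → a + k = lenS + 1 →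
    (∀ i' j', i' ≤ lenS → j' ≤ lenT → (i' < a ∨ j' = 0) → d i' j' = refD s t i' j') →
    (∀ i' j', i' ≤ lenS → j' ≤ lenT → (i' < a + k ∨ j' = 0) →
      ((List.range' a k).foldl
        (fun d i => (List.range' 1 lenT).foldl (fun d j => pvUpd d i j (osaCell2 s t d i j)) d) d) i' j'
        = refD s t i' j') := by
  intro k
  induction k with
  | zero =>
    intro a d _ _ hd i' j' h1 h2 h3
    simpa [List.range'] using hd i' j' h1 h2 h3
  | succ k ih =>
    intro a d ha hak hd
    rw [List.range'_succ, List.foldl_cons]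
    have hrow := pass2Row s t lenS lenT a ha (by omega) lenT 1 d (by omega) (by omega) ?_
    · have hres := ih (a+1)
        ((List.range' 1 lenT).foldl (fun d j => pvUpd d a j (osaCell2 s t d a j)) d)
        (by omega) (by omega) ?_
      · intro i' j' h1 h2 h3
        exact hres i' j' h1 h2 (by omega)
      · intro i' j' h1 h2 h3
        apply hrow i' j' h1 h2
        rcases h3 with h | h
        · rcases Nat.lt_or_ge i' a with h' | h'
          · exact Or.inl h'
          · exact Or.inr (Or.inl ⟨by omega, by omega⟩)
        · exact Or.inr (Or.inr h)
    · intro i' j' h1 h2 h3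
      apply hd i' j' h1 h2
      rcases h3 with h | ⟨_, h⟩ | h
      · exact Or.inl h
      · exact Or.inr (by omega)
      · exact Or.inr h

theorem refD_left (s t : List Char) (j : Nat) : refD s t 0 j = (j : Int) := by
  rw [refD]

theorem refD_right (s t : List Char) (i : Nat) : refD s t i 0 = (i : Int) := by
  cases i <;> rw [refD]

def pvD3 (s t : List Char) : Nat → Nat → Int :=
  (List.range' 1 s.length).foldl
    (fun d i => (List.range' 1 t.length).foldl (fun d j => pvUpd d i j (osaCell1 s t d i j)) d)
    ((List.range (t.length + 1)).foldl (fun d j => pvUpd d 0 j (j : Int))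
      ((List.range (s.length + 1)).foldl (fun d i => pvUpd d i 0 (i : Int)) (fun _ _ => 0)))

theorem pvD3_boundary (s t : List Char) (i' j' : Nat) (h1 : i' ≤ s.length) (h2 : j' ≤ t.length)
    (h3 : i' = 0 ∨ j' = 0) : pvD3 s t i' j' = refD s t i' j' := by
  unfold pvD3
  rw [passPres osaCell1 s t t.length s.length 1 _ i' j' (by omega) h3]
  rw [List.range_eq_range', List.range_eq_range', initCols, initRows]
  rcases h3 with rfl | rfl
  · rw [if_pos ⟨rfl, by omega, by omega⟩, refD_left]
  · rcases Nat.eq_zero_or_pos i' with rfl | hpos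
    · rw [if_pos ⟨rfl, by omega, by omega⟩, refD_left]
    · rw [if_neg (by omega), if_pos ⟨rfl, by omega, by omega⟩, refD_right]

def pvD2L (s t : List Char) : List (List Int) :=
  (List.range (t.length + 1)).foldl (fun d j => pvSet d 0 j (j : Int))
    ((List.range (s.length + 1)).foldl (fun d i => pvSet d i 0 (i : Int))
      (List.replicate (s.length + 1) (List.replicate (t.length + 1) 0)))

def pvD3L (s t : List Char) : List (List Int) :=
  (List.range' 1 s.length).foldl
    (fun d i => (List.range' 1 t.length).foldl
      (fun d j => pvSet d i j (osaCell1 s t (pvGet d) i j)) d) (pvD2L s t)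

def pvD4L (s t : List Char) : List (List Int) :=
  (List.range' 1 s.length).foldl
    (fun d i => (List.range' 1 t.length).foldl
      (fun d j => pvSet d i j (osaCell2 s t (pvGet d) i j)) d) (pvD3L s t)

theorem osaL_eq (s t : List Char) :
    pvGet (pvD4L s t) s.length t.length = refD s t s.length t.length := by
  have h1 := simRows (s.length+1) (t.length+1) (by omega) (List.range (s.length+1))
    (List.replicate (s.length + 1) (List.replicate (t.length + 1) (0 : Int)))
    (shape_init _ _) (fun x hx => by simp [List.mem_range] at hx; omega)
  have h2 := simCols (s.length+1) (t.length+1) (by omega) (List.range (t.length+1))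
    ((List.range (s.length + 1)).foldl (fun d i => pvSet d i 0 (i : Int))
      (List.replicate (s.length + 1) (List.replicate (t.length + 1) 0)))
    h1.1 (fun x hx => by simp [List.mem_range] at hx; omega)
  have h3 := simPass (s.length+1) (t.length+1) t.length (by omega) (osaCell1 s t)
    (List.range' 1 s.length) (pvD2L s t) h2.1
    (fun i hi => by have := List.mem_range'_1.mp hi; omega)
  have h4 := simPass (s.length+1) (t.length+1) t.length (by omega) (osaCell2 s t)
    (List.range' 1 s.length) (pvD3L s t) h3.1
    (fun i hi => by have := List.mem_range'_1.mp hi; omega)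
  unfold pvD4L
  rw [h4.2]
  unfold pvD3L
  rw [h3.2]
  unfold pvD2L
  rw [h2.2, h1.2, pvGet_init]
  exact pass2All s t s.length t.length s.length 1 (pvD3 s t) (by omega) (by omega)
    (fun i' j' a b c => pvD3_boundary s t i' j' a b (by omega))
    s.length t.length le_rfl le_rfl (Or.inl (by omega))

theorem osa_eq_refD (source target : String) :
    osa source target = refD source.toList target.toList source.toList.length target.toList.length :=
  osaL_eq source.toList target.toList

-- ===== B-side =====

-- every value cached in the memo is the corresponding refD value
def MemoInv (s t : List Char) (memo : PySem.Dict (Nat × Nat) Int) : Prop :=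
  ∀ i j v, memo.get? (i, j) = some v → v = refD s t i j

theorem memoInv_empty (s t : List Char) : MemoInv s t PySem.Dict.empty := by
  intro i j v h
  rw [PySem.Dict.get?_empty] at h
  exact absurd h (by simp)

theorem memoInv_insert (s t : List Char) (memo : PySem.Dict (Nat × Nat) Int)
    (i j : Nat) (v : Int) (hm : MemoInv s t memo) (hv : v = refD s t i j) :
    MemoInv s t (memo.insert (i, j) v) := by
  intro i' j' w h
  rw [PySem.Dict.get?_insert] at h
  split at h
  · next he =>
    obtain ⟨rfl, rfl⟩ := Prod.mk.injEq .. ▸ he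
    cases h
    exact hv
  · exact hm i' j' w h

-- the memoized recursion computes refD and keeps the invariant
theorem osaAltF_correct (s t : List Char) :
    ∀ (n i j : Nat) (memo : PySem.Dict (Nat × Nat) Int), i + j ≤ n → MemoInv s t memo →
    (osaAltF s t i j memo).1 = refD s t i j ∧ MemoInv s t (osaAltF s t i j memo).2 := by
  intro n
  induction n with
  | zero =>
    intro i j memo hn hm
    obtain ⟨rfl, rfl⟩ : i = 0 ∧ j = 0 := by omega
    rw [osaAltF]
    exact ⟨(refD_right s t 0).symm, hm⟩
  | succ n ih =>
    intro i j memo hn hm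
    rw [osaAltF]
    by_cases hj : j = 0
    · subst hj
      rw [if_pos rfl]
      exact ⟨(refD_right s t i).symm, hm⟩
    rw [if_neg hj]
    by_cases hi : i = 0
    · subst hi
      rw [if_pos rfl]
      exact ⟨(refD_left s t j).symm, hm⟩
    rw [if_neg hi]
    cases hc : memo.get? (i, j) with
    | some v => exact ⟨hm i j v hc, hm⟩
    | none =>
      simp only
      obtain ⟨e1, m1⟩ := ih (i-1) j memo (by omega) hm
      obtain ⟨e2, m2⟩ := ih i (j-1) _ (by omega) m1
      obtain ⟨e3, m3⟩ := ih (i-1) (j-1) _ (by omega) m2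
      by_cases hcond : 1 < i ∧ 1 < j ∧ s.getD (i-1) ' ' = t.getD (j-2) ' ' ∧ s.getD (i-2) ' ' = t.getD (j-1) ' '
      · rw [if_pos hcond]
        obtain ⟨e4, m4⟩ := ih (i-2) (j-2) _ (by omega) m3
        have hval := refD_step s t i j (by omega) (by omega) _ _ _ _ e1 e2 e3 (fun _ _ => e4)
        rw [if_pos hcond] at hval
        exact ⟨hval, memoInv_insert s t _ i j _ m4 hval⟩
      · rw [if_neg hcond]
        have hval := refD_step s t i j (by omega) (by omega) _ _ _
          (refD s t (i-2) (j-2)) e1 e2 e3 (fun _ _ => rfl)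
        rw [if_neg hcond] at hval
        exact ⟨hval, memoInv_insert s t _ i j _ m3 hval⟩

theorem osa_alt_eq_refD (source target : String) :
    osa_alt source target = refD source.toList target.toList source.toList.length target.toList.length := by
  exact (osaAltF_correct source.toList target.toList
    (source.toList.length + target.toList.length) source.toList.length target.toList.length
    PySem.Dict.empty le_rfl (memoInv_empty _ _)).1

-- ===== VERDICT (by name: the statement is the Claim_ definition above) =====
theorem osa_spec : Claim_equal_osa := by
  intro source target _
  unfold Spec_osa
  rw [osa_eq_refD, osa_alt_eq_refD]
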